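-- pv_equiv track=rewrite | github.com/wilmurillo-ai/Design-Assistant | .skills/openclaw-skills/skills/bbd145/aws-wechat-article-publish/scripts/article_init.py | _merge_article_yaml
-- ===== SOURCE A (Python) =====
-- def _merge_article_yaml(existing_text: str, title: str, author: str, digest: str) -> str:
--     """
--     朴素合并：逐行替换常见键；若不存在则在末尾追加。
--     仅处理少量关键字段，避免引入额外依赖。
--     """
--     lines = existing_text.splitlines()
--     keys = {
--         "title": title,
--         "author": author,
--         "digest": digest,
--     }
--     found = {k: False for k in keys}
--     for i, line in enumerate(lines):
--         for key, val in keys.items():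
--             if val is None or val == "":
--                 continue
--             prefix = f"{key}:"
--             if line.strip().startswith(prefix):
--                 # 保留引号以避免 YAML 解析歧义
--                 lines[i] = f'{key}: "{val}"'
--                 found[key] = True
--     # 追加缺失键
--     for key, val in keys.items():
--         if val is None or val == "":
--             continue
--         if not found[key]:
--             lines.append(f'{key}: "{val}"')
--     return "\n".join(lines) + ("\n" if not existing_text.endswith("\n") else "")
-- ===== SOURCE B (Python) =====
-- def _merge_article_yaml(existing_text: str, title: str, author: str, digest: str) -> str:
--     """Per-field decomposition: one full replace-or-append scan per key."""
--     lines = existing_text.splitlines()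
--     for key, val in (("title", title), ("author", author), ("digest", digest)):
--         if not val:
--             continue
--         new_line = f'{key}: "{val}"'
--         out = []
--         replaced = False
--         for line in lines:
--             if line.strip().startswith(key + ":"):
--                 out.append(new_line)
--                 replaced = True
--             else:
--                 out.append(line)
--         lines = out if replaced else out + [new_line]
--     return "\n".join(lines) + ("" if existing_text.endswith("\n") else "\n")
-- ===== Notes on version B (the rewrite author's own statement) =====
-- stated objective: alternative
-- what changed: B replaces the single line-scan with an inner loop over all three keys (plus a found-dict and a separate append phase) by one replace-or-append scan per field: for each non-empty field it rewrites every matching line in a full pass and appends the key line only if that pass replaced nothing.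
import Mathlib
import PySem

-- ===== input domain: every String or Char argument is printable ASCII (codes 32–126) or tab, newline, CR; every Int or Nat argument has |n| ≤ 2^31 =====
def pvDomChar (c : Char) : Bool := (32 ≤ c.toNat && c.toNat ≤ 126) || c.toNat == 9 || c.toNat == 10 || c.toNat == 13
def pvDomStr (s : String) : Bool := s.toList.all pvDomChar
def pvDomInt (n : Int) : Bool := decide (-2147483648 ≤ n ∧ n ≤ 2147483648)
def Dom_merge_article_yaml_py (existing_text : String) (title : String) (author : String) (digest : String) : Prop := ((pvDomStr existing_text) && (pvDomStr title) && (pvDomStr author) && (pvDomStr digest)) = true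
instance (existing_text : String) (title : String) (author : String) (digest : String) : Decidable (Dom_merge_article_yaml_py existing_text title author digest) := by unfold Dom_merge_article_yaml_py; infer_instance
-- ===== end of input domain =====

-- B replaces A's single scan with an inner key loop + found-dict by one replace-or-append pass per field (same cost, different decomposition); return values proved equal for all inputs.


-- ===== PORT A =====
-- keys = {"title": title, "author": author, "digest": digest} in insertion order
def pvKeysA (title author digest : String) : List (String × String) :=
  [("title", title), ("author", author), ("digest", digest)]

-- the inner `for key, val in keys.items()` loop of A for one line (writing lines[i] and found)
def pvLineA (keys : List (String × String)) (line : String) (found : PySem.Dict String Bool) :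
    String × PySem.Dict String Bool :=
  keys.foldl (fun st kv =>
    if kv.2 == "" then st
    else if PySem.Str.startswith (PySem.Str.strip line) (kv.1 ++ ":") then
      (kv.1 ++ ": \"" ++ kv.2 ++ "\"", st.2.insert kv.1 true)
    else st) (line, found)

def merge_article_yaml_py (existing_text : String) (title : String) (author : String) (digest : String) : String :=
  let lines := PySem.Str.splitlines existing_text
  let keys := pvKeysA title author digest
  let found0 : PySem.Dict String Bool :=
    keys.foldl (fun d kv => d.insert kv.1 false) PySem.Dict.empty
  let st := lines.foldl
    (fun (st : List String × PySem.Dict String Bool) line =>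
      let r := pvLineA keys line st.2
      (st.1 ++ [r.1], r.2)) ([], found0)
  let finalLines := keys.foldl
    (fun ls kv =>
      if kv.2 == "" then ls
      else if st.2.getD kv.1 false then ls
      else ls ++ [kv.1 ++ ": \"" ++ kv.2 ++ "\""]) st.1
  PySem.Str.join "\n" finalLines ++ (if PySem.Str.endswith existing_text "\n" then "" else "\n")

-- ===== PORT B =====
-- one replace-or-append pass for a single key (B's inner loop + append-if-no-replacement)
def pvPassB (lines : List String) (key : String) (val : String) : List String :=
  if val == "" then lines
  else
    let newLine := key ++ ": \"" ++ val ++ "\""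
    let st := lines.foldl
      (fun (st : List String × Bool) line =>
        if PySem.Str.startswith (PySem.Str.strip line) (key ++ ":") then (st.1 ++ [newLine], true)
        else (st.1 ++ [line], st.2)) ([], false)
    if st.2 then st.1 else st.1 ++ [newLine]

def merge_article_yaml_py_alt (existing_text : String) (title : String) (author : String) (digest : String) : String :=
  let lines0 := PySem.Str.splitlines existing_text
  let lines := [("title", title), ("author", author), ("digest", digest)].foldl
    (fun ls kv => pvPassB ls kv.1 kv.2) lines0
  PySem.Str.join "\n" lines ++ (if PySem.Str.endswith existing_text "\n" then "" else "\n")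

-- ===== PRECONDITION & SPEC =====
def Spec_merge_article_yaml_py (existing_text : String) (title : String) (author : String) (digest : String) (out : String) : Prop := out = merge_article_yaml_py_alt existing_text title author digest
instance (existing_text : String) (title : String) (author : String) (digest : String) (out : String) : Decidable (Spec_merge_article_yaml_py existing_text title author digest out) := by unfold Spec_merge_article_yaml_py; infer_instance

-- ===== CLAIM (what is proved, stated in full; the proofs are below) =====
def Claim_equal_merge_article_yaml_py : Prop := ∀ (existing_text : String) (title : String) (author : String) (digest : String), Dom_merge_article_yaml_py existing_text title author digest → Spec_merge_article_yaml_py existing_text title author digest (merge_article_yaml_py existing_text title author digest)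

-- ===== LEMMAS AND PROOFS =====

def mtP (k l : String) : Bool := PySem.Str.startswith (PySem.Str.strip l) (k ++ ":")
def nlP (k v : String) : String := k ++ ": \"" ++ v ++ "\""

theorem startswith_false_of_head_ne (s p : String) (c c' : Char)
    (hs : s.toList.head? = some c) (hp : p.toList.head? = some c') (h : c ≠ c') :
    PySem.Str.startswith s p = false := by
  simp only [PySem.Str.startswith, PySem.Chars.startswith]
  rw [Bool.eq_false_iff]
  intro hpre
  rw [List.isPrefixOf_iff_prefix] at hpre
  obtain ⟨t, ht⟩ := hpre
  rw [← ht, List.head?_append] at hs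
  rw [hp] at hs
  simp at hs
  exact h (by simp [hs])

theorem mt_head (k l : String) (c : Char) (hc : (k ++ ":").toList.head? = some c)
    (h : mtP k l = true) : (PySem.Str.strip l).toList.head? = some c := by
  simp only [mtP, PySem.Str.startswith, PySem.Chars.startswith] at h
  rw [List.isPrefixOf_iff_prefix] at h
  obtain ⟨t, ht⟩ := h
  rw [← ht, List.head?_append, hc]
  rfl

theorem strip_head_nl (k v : String) (c : Char) (hk : k.toList.head? = some c)
    (hsp : PySem.Chars.isspace c = false) :
    (PySem.Str.strip (nlP k v)).toList.head? = some c := by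
  obtain ⟨kt, hkt⟩ : ∃ kt, k.toList = c :: kt := by
    cases h : k.toList with
    | nil => rw [h] at hk; simp at hk
    | cons a t => rw [h] at hk; simp at hk; exact ⟨t, by rw [hk]⟩
  have hL : (nlP k v).toList = c :: ((kt ++ (": \"".toList) ++ v.toList) ++ ['"']) := by
    simp [nlP, hkt]
  simp only [PySem.Str.strip, PySem.Chars.strip, PySem.Chars.lstrip, PySem.Chars.rstrip]
  rw [String.toList_ofList]
  rw [hL]
  rw [List.dropWhile_cons]
  simp only [hsp, if_false, Bool.false_eq_true]
  have : (c :: ((kt ++ (": \"".toList) ++ v.toList) ++ ['"'])).reverse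
      = '"' :: (c :: (kt ++ (": \"".toList) ++ v.toList)).reverse := by
    simp
  rw [this, List.dropWhile_cons]
  have h2 : PySem.Chars.isspace '"' = false := by decide
  simp [h2]

theorem mt_excl (l k1 k2 : String) (c1 c2 : Char)
    (h1 : (k1 ++ ":").toList.head? = some c1) (h2 : (k2 ++ ":").toList.head? = some c2)
    (hne : c1 ≠ c2) (hm : mtP k1 l = true) : mtP k2 l = false := by
  have hh := mt_head k1 l c1 h1 hm
  exact startswith_false_of_head_ne _ _ c1 c2 hh h2 hne

theorem mt_nl (k v k' : String) (c c' : Char)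
    (hk : k.toList.head? = some c) (hsp : PySem.Chars.isspace c = false)
    (hk' : (k' ++ ":").toList.head? = some c') (hne : c ≠ c') :
    mtP k' (nlP k v) = false := by
  exact startswith_false_of_head_ne _ _ c c' (strip_head_nl k v c hk hsp) hk' hne

def bRep (k v l : String) : String := if !(v == "") && mtP k l then nlP k v else l
def appP (k v : String) (lines : List String) : List String :=
  if !(v == "") && !(lines.any (mtP k)) then [nlP k v] else []

theorem mtP_def (k l : String) :
    PySem.Str.startswith (PySem.Str.strip l) (k ++ ":") = mtP k l := rfl

theorem passB_fold (k : String) (nl : String) (lines : List String) :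
    ∀ (acc : List String) (b : Bool),
    lines.foldl (fun (st : List String × Bool) line =>
        if PySem.Str.startswith (PySem.Str.strip line) (k ++ ":") then (st.1 ++ [nl], true)
        else (st.1 ++ [line], st.2)) (acc, b)
      = (acc ++ lines.map (fun l => if mtP k l then nl else l), b || lines.any (mtP k)) := by
  induction lines with
  | nil => intro acc b; simp
  | cons x xs ih =>
    intro acc b
    simp only [List.foldl_cons, List.map_cons, List.any_cons]
    rw [mtP_def]
    by_cases h : mtP k x = true
    · rw [if_pos h, ih]; simp [h]
    · rw [if_neg h, ih]; simp [h]

theorem passB_eq (lines : List String) (k v : String) :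
    pvPassB lines k v = lines.map (bRep k v) ++ appP k v lines := by
  unfold pvPassB
  cases hv : v == "" with
  | true =>
    have : v = "" := by simpa using hv
    have hfun : bRep k "" = fun l => l := by funext l; simp [bRep]
    simp [appP, this, hfun]
  | false =>
    simp only [Bool.false_eq_true, if_false]
    rw [passB_fold k (k ++ ": \"" ++ v ++ "\"") lines [] false]
    cases ha : lines.any (mtP k) with
    | true => simp [ha, appP, hv, bRep, nlP]
    | false => simp [ha, appP, hv, bRep, nlP]

-- transport: a one-key replacement does not change whether a different key matches
theorem mt_bRep (k k' v l : String) (hnl : mtP k' (nlP k v) = false)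
    (hexcl : mtP k l = true → mtP k' l = false) : mtP k' (bRep k v l) = mtP k' l := by
  unfold bRep
  split_ifs with h
  · have hk : mtP k l = true := by
      rcases Bool.and_eq_true_iff.mp h with ⟨_, hk⟩; exact hk
    rw [hnl, hexcl hk]
  · rfl

-- concrete instances
theorem mt_ta (l : String) : mtP "title" l = true → mtP "author" l = false :=
  fun h => mt_excl l _ _ 't' 'a' (by decide) (by decide) (by decide) h
theorem mt_td (l : String) : mtP "title" l = true → mtP "digest" l = false :=
  fun h => mt_excl l _ _ 't' 'd' (by decide) (by decide) (by decide) h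
theorem mt_at (l : String) : mtP "author" l = true → mtP "title" l = false :=
  fun h => mt_excl l _ _ 'a' 't' (by decide) (by decide) (by decide) h
theorem mt_ad (l : String) : mtP "author" l = true → mtP "digest" l = false :=
  fun h => mt_excl l _ _ 'a' 'd' (by decide) (by decide) (by decide) h
theorem mt_dt (l : String) : mtP "digest" l = true → mtP "title" l = false :=
  fun h => mt_excl l _ _ 'd' 't' (by decide) (by decide) (by decide) h
theorem mt_da (l : String) : mtP "digest" l = true → mtP "author" l = false :=
  fun h => mt_excl l _ _ 'd' 'a' (by decide) (by decide) (by decide) h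
theorem mtnl_ta (v : String) : mtP "author" (nlP "title" v) = false :=
  mt_nl _ _ _ 't' 'a' (by decide) (by decide) (by decide) (by decide)
theorem mtnl_td (v : String) : mtP "digest" (nlP "title" v) = false :=
  mt_nl _ _ _ 't' 'd' (by decide) (by decide) (by decide) (by decide)
theorem mtnl_ad (v : String) : mtP "digest" (nlP "author" v) = false :=
  mt_nl _ _ _ 'a' 'd' (by decide) (by decide) (by decide) (by decide)

def condIns (k v l : String) (fd : PySem.Dict String Bool) : PySem.Dict String Bool :=
  if !(v == "") && mtP k l then fd.insert k true else fd

theorem lineA_eq (t a d l : String) (fd : PySem.Dict String Bool) :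
    pvLineA (pvKeysA t a d) l fd
      = (bRep "digest" d (bRep "author" a (bRep "title" t l)),
         condIns "digest" d l (condIns "author" a l (condIns "title" t l fd))) := by
  have e1 := mt_ta l; have e2 := mt_td l; have e3 := mt_at l
  have e4 := mt_ad l; have e5 := mt_dt l; have e6 := mt_da l
  have n1 := mtnl_ta t; have n2 := mtnl_td t; have n3 := mtnl_ad a
  unfold pvLineA pvKeysA
  simp only [List.foldl_cons, List.foldl_nil, mtP_def]
  by_cases h1 : t == "" <;> by_cases h2 : a == "" <;> by_cases h3 : d == "" <;>
  by_cases m1 : mtP "title" l = true <;> by_cases m2 : mtP "author" l = true <;>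
  by_cases m3 : mtP "digest" l = true <;>
    simp_all [bRep, condIns, nlP]

def aChain (t a d l : String) : String := bRep "digest" d (bRep "author" a (bRep "title" t l))
def fChain (t a d l : String) (fd : PySem.Dict String Bool) : PySem.Dict String Bool :=
  condIns "digest" d l (condIns "author" a l (condIns "title" t l fd))

theorem foldChain (t a d : String) (lines : List String) :
    ∀ (acc : List String) (fd : PySem.Dict String Bool),
    lines.foldl (fun (st : List String × PySem.Dict String Bool) line =>
        (st.1 ++ [aChain t a d line], fChain t a d line st.2)) (acc, fd)
      = (acc ++ lines.map (aChain t a d), lines.foldl (fun fd l => fChain t a d l fd) fd) := by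
  induction lines with
  | nil => intro acc fd; simp
  | cons x xs ih =>
    intro acc fd
    simp only [List.foldl_cons, List.map_cons]
    rw [ih]
    simp

theorem foldA_eq (t a d : String) (lines : List String) (acc : List String)
    (fd : PySem.Dict String Bool) :
    lines.foldl (fun (st : List String × PySem.Dict String Bool) line =>
        let r := pvLineA (pvKeysA t a d) line st.2
        (st.1 ++ [r.1], r.2)) (acc, fd)
      = (acc ++ lines.map (aChain t a d), lines.foldl (fun fd l => fChain t a d l fd) fd) := by
  have hf : (fun (st : List String × PySem.Dict String Bool) line =>
        let r := pvLineA (pvKeysA t a d) line st.2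
        (st.1 ++ [r.1], r.2))
      = (fun (st : List String × PySem.Dict String Bool) line =>
        (st.1 ++ [aChain t a d line], fChain t a d line st.2)) := by
    funext st line
    simp [lineA_eq, aChain, fChain]
  rw [hf, foldChain]

theorem getD_condIns_self (k v l : String) (fd : PySem.Dict String Bool) :
    (condIns k v l fd).getD k false = (fd.getD k false || (!(v == "") && mtP k l)) := by
  unfold condIns
  split_ifs with h
  · simp [h]
  · simp [Bool.eq_false_iff.mpr h]
theorem getD_condIns_ne (k k' v l : String) (hne : k' ≠ k) (fd : PySem.Dict String Bool) :
    (condIns k v l fd).getD k' false = fd.getD k' false := by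
  unfold condIns
  split_ifs with h
  · simp [PySem.Dict.getD_insert, hne]
  · rfl

theorem getD_fold_or (step : PySem.Dict String Bool → String → PySem.Dict String Bool)
    (g : String → Bool) (k : String)
    (hstep : ∀ fd l, (step fd l).getD k false = (fd.getD k false || g l)) (lines : List String) :
    ∀ fd, (lines.foldl step fd).getD k false = (fd.getD k false || lines.any g) := by
  induction lines with
  | nil => intro fd; simp
  | cons x xs ih =>
    intro fd
    simp only [List.foldl_cons, List.any_cons]
    rw [ih, hstep, Bool.or_assoc]

theorem bRep_of_not (k v l : String) (h : mtP k l = false) : bRep k v l = l := by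
  unfold bRep; simp [h]

theorem getD_fChain_title (t a d l : String) (fd : PySem.Dict String Bool) :
    (fChain t a d l fd).getD "title" false
      = (fd.getD "title" false || (!(t == "") && mtP "title" l)) := by
  unfold fChain
  rw [getD_condIns_ne _ _ _ _ (by decide), getD_condIns_ne _ _ _ _ (by decide),
    getD_condIns_self]

theorem getD_fChain_author (t a d l : String) (fd : PySem.Dict String Bool) :
    (fChain t a d l fd).getD "author" false
      = (fd.getD "author" false || (!(a == "") && mtP "author" l)) := by
  unfold fChain
  rw [getD_condIns_ne _ _ _ _ (by decide), getD_condIns_self,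
    getD_condIns_ne _ _ _ _ (by decide)]

theorem getD_fChain_digest (t a d l : String) (fd : PySem.Dict String Bool) :
    (fChain t a d l fd).getD "digest" false
      = (fd.getD "digest" false || (!(d == "") && mtP "digest" l)) := by
  unfold fChain
  rw [getD_condIns_self, getD_condIns_ne _ _ _ _ (by decide),
    getD_condIns_ne _ _ _ _ (by decide)]

theorem any_const_and (c : Bool) (p : String → Bool) (L : List String) :
    L.any (fun l => c && p l) = (c && L.any p) := by
  cases c with
  | true => simp
  | false => simp

theorem mem_appP (k v x : String) (L : List String) (hx : x ∈ appP k v L) : x = nlP k v := by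
  unfold appP at hx
  split at hx
  · simpa using hx
  · simp at hx

theorem pass_through (k v : String) (g : String → String) (tail : List String) (L : List String)
    (hg : ∀ l, mtP k (g l) = mtP k l)
    (ht : ∀ x ∈ tail, mtP k x = false) :
    pvPassB (L.map g ++ tail) k v
      = L.map (fun l => bRep k v (g l)) ++ (tail ++ appP k v L) := by
  have htail : tail.map (bRep k v) = tail := by
    rw [List.map_congr_left (fun x hx => bRep_of_not k v x (ht x hx))]
    exact List.map_id _
  have hanyL : (L.map g).any (mtP k) = L.any (mtP k) := by
    rw [List.any_map]
    exact congrArg _ (funext hg)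
  have hanyT : tail.any (mtP k) = false := by
    rw [List.any_eq_false]
    intro x hx
    simp [ht x hx]
  have hany : (L.map g ++ tail).any (mtP k) = L.any (mtP k) := by
    rw [List.any_append, hanyL, hanyT, Bool.or_false]
  rw [passB_eq]
  have happ : appP k v (L.map g ++ tail) = appP k v L := by
    unfold appP
    rw [hany]
  rw [happ, List.map_append, htail, List.map_map, List.append_assoc]
  rfl

theorem passB3_eq (t a d : String) (L : List String) :
    pvPassB (pvPassB (pvPassB L "title" t) "author" a) "digest" d
      = L.map (aChain t a d)
        ++ (appP "title" t L ++ (appP "author" a L ++ appP "digest" d L)) := by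
  have hA : ∀ l, mtP "author" (bRep "title" t l) = mtP "author" l :=
    fun l => mt_bRep _ _ _ _ (mtnl_ta t) (mt_ta l)
  have hD1 : ∀ l, mtP "digest" (bRep "title" t l) = mtP "digest" l :=
    fun l => mt_bRep _ _ _ _ (mtnl_td t) (mt_td l)
  have hD2 : ∀ l, mtP "digest" (bRep "author" a l) = mtP "digest" l :=
    fun l => mt_bRep _ _ _ _ (mtnl_ad a) (mt_ad l)
  have h1 : pvPassB L "title" t = L.map (fun l => bRep "title" t l) ++ ([] ++ appP "title" t L) := by
    have := pass_through "title" t (fun l => l) [] L (fun l => rfl) (by intro x hx; simp at hx)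
    simpa using this
  rw [h1, List.nil_append]
  rw [pass_through "author" a _ _ L hA
    (fun x hx => (mem_appP _ _ _ _ hx) ▸ mtnl_ta t)]
  rw [pass_through "digest" d _ _ L (fun l => (hD2 _).trans (hD1 l))
    (by
      intro x hx
      rcases List.mem_append.mp hx with h | h
      · exact (mem_appP _ _ _ _ h) ▸ mtnl_td t
      · exact (mem_appP _ _ _ _ h) ▸ mtnl_ad a)]
  rw [List.append_assoc]
  rfl

theorem foldA_eq' (t a d : String) (lines acc : List String) (fd : PySem.Dict String Bool) :
    List.foldl (fun (st : List String × PySem.Dict String Bool) line =>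
        (st.1 ++ [(pvLineA [("title", t), ("author", a), ("digest", d)] line st.2).1],
         (pvLineA [("title", t), ("author", a), ("digest", d)] line st.2).2)) (acc, fd) lines
      = (acc ++ lines.map (aChain t a d), lines.foldl (fun fd l => fChain t a d l fd) fd) := by
  have h := foldA_eq t a d lines acc fd
  simpa [pvKeysA] using h

theorem merge_eq (e t a d : String) :
    merge_article_yaml_py e t a d = merge_article_yaml_py_alt e t a d := by
  unfold merge_article_yaml_py merge_article_yaml_py_alt
  simp only [pvKeysA, List.foldl_cons, List.foldl_nil]
  rw [foldA_eq', passB3_eq]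
  have hT : (List.foldl (fun fd l => fChain t a d l fd)
      (((PySem.Dict.empty.insert "title" false).insert "author" false).insert "digest" false)
      (PySem.Str.splitlines e)).getD "title" false
      = (!(t == "") && (PySem.Str.splitlines e).any (mtP "title")) := by
    rw [getD_fold_or _ _ _ (fun fd l => getD_fChain_title t a d l fd), any_const_and]
    have h0 : ((((PySem.Dict.empty.insert "title" false).insert "author" false).insert "digest" false).getD "title" false) = false := by decide
    rw [h0, Bool.false_or]
  have hA : (List.foldl (fun fd l => fChain t a d l fd)
      (((PySem.Dict.empty.insert "title" false).insert "author" false).insert "digest" false)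
      (PySem.Str.splitlines e)).getD "author" false
      = (!(a == "") && (PySem.Str.splitlines e).any (mtP "author")) := by
    rw [getD_fold_or _ _ _ (fun fd l => getD_fChain_author t a d l fd), any_const_and]
    have h0 : ((((PySem.Dict.empty.insert "title" false).insert "author" false).insert "digest" false).getD "author" false) = false := by decide
    rw [h0, Bool.false_or]
  have hD : (List.foldl (fun fd l => fChain t a d l fd)
      (((PySem.Dict.empty.insert "title" false).insert "author" false).insert "digest" false)
      (PySem.Str.splitlines e)).getD "digest" false
      = (!(d == "") && (PySem.Str.splitlines e).any (mtP "digest")) := by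
    rw [getD_fold_or _ _ _ (fun fd l => getD_fChain_digest t a d l fd), any_const_and]
    have h0 : ((((PySem.Dict.empty.insert "title" false).insert "author" false).insert "digest" false).getD "digest" false) = false := by decide
    rw [h0, Bool.false_or]
  simp only [hT, hA, hD]
  congr 1
  congr 1
  by_cases h1 : t == "" <;> by_cases h2 : a == "" <;> by_cases h3 : d == "" <;>
  by_cases q1 : (PySem.Str.splitlines e).any (mtP "title") = true <;>
  by_cases q2 : (PySem.Str.splitlines e).any (mtP "author") = true <;>
  by_cases q3 : (PySem.Str.splitlines e).any (mtP "digest") = true <;>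
    simp [h1, h2, h3, q1, q2, q3, appP, nlP, List.append_assoc]

-- ===== VERDICT (by name: the statement is the Claim_ definition above) =====
theorem merge_article_yaml_py_spec : Claim_equal_merge_article_yaml_py := by
  intro existing_text title author digest _
  exact merge_eq existing_text title author digest
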